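-- pv_equiv track=rewrite | github.com/peterwj/advent-of-code | day08.py | do_problem
-- ===== SOURCE A (Python) =====
-- def do_problem(lines):
--     code = 0
--     data = 0
--     for line in lines:
--         code += len(line)
--         i = 1 #skip leading "
--         while i < len(line) - 1: # skip trailing "
--             if line[i] != '\\':
--                 data += 1
--             else:
--                 i += 1
--                 if line[i] in ('\\', '"'):
--                     data += 1
--                 elif line[i] == 'x':
--                     data += 1
--                     i += 2
--                 else:
--                     assert(False)
--             i += 1
--
--     return code - data
-- ===== SOURCE B (Python) =====
-- def _decoded_len(line):
--     # Number of decoded characters between the delimiting quotes, computed by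
--     # jumping from backslash to backslash with str.find and adding whole runs
--     # of ordinary characters at once.
--     n = len(line)
--     data = 0
--     i = 1
--     while i < n - 1:
--         j = line.find('\\', i, n - 1)
--         if j == -1:
--             return data + (n - 1) - i
--         data += j - i + 1
--         e = line[j + 1]
--         if e == '\\' or e == '"':
--             i = j + 2
--         elif e == 'x':
--             i = j + 4
--         else:
--             raise ValueError('unknown escape in ' + line)
--     return data
--
--
-- def do_problem(lines):
--     return sum(len(line) - _decoded_len(line) for line in lines)
-- ===== Notes on version B (the rewrite author's own statement) =====
-- stated objective: alternative
-- what changed: A's per-character index state machine is replaced by a skip-scan that locates each backslash with str.find and adds whole runs of ordinary characters in one arithmetic step; code and data totals are folded into a single sum(len(line) - decoded_len(line)).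
-- outside the precondition, e.g. on do_problem(['"a\\q"']): A raises AssertionError, B raises ValueError
import Mathlib
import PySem

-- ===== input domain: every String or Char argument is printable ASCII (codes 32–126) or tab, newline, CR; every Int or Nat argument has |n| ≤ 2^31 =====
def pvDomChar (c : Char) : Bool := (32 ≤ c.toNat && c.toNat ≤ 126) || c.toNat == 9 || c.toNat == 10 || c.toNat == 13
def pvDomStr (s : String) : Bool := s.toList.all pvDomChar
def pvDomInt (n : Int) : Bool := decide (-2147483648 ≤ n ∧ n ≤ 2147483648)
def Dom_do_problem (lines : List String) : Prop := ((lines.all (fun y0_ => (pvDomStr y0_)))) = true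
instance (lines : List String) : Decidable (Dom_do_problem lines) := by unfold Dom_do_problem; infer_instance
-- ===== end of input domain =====

-- B replaces A's per-character index state machine by a skip-scan that jumps
-- between backslashes with str.find and adds whole runs of ordinary characters
-- in one arithmetic step (objective: alternative algorithm of the same O(n) cost).


-- ===== PORT A =====
-- the inner while loop of A; `data` is the running decoded-character count.
-- On the `assert(False)` branch Python raises; the port returns the data
-- accumulated so far (the input is excluded by Pre_do_problem).
def aLoop (cs : List Char) (i : Nat) (data : Int) : Int :=
  if i + 1 < cs.length then
    if cs.getD i ' ' ≠ '\\' then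
      aLoop cs (i + 1) (data + 1)
    else
      let d := cs.getD (i + 1) ' '
      if d = '\\' ∨ d = '"' then aLoop cs (i + 2) (data + 1)
      else if d = 'x' then aLoop cs (i + 4) (data + 1)
      else data
  else data
termination_by cs.length - i
decreasing_by
  · exact Nat.sub_lt_sub_left (Nat.lt_of_succ_lt ‹i + 1 < cs.length›) (Nat.lt_succ_self i)
  · exact Nat.sub_lt_sub_left (Nat.lt_of_succ_lt ‹i + 1 < cs.length›)
      (Nat.lt_succ_of_le (Nat.le_succ_of_le (Nat.le_refl i)))
  · exact Nat.sub_lt_sub_left (Nat.lt_of_succ_lt ‹i + 1 < cs.length›)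
      (Nat.lt_succ_of_le (Nat.le_succ_of_le (Nat.le_succ_of_le (Nat.le_succ_of_le (Nat.le_refl i)))))

def do_problem (lines : List String) : Int :=
  let st := lines.foldl
    (fun (st : Int × Int) line =>
      (st.1 + (line.toList.length : Int), aLoop line.toList 1 st.2))
    (0, 0)
  st.1 - st.2

-- ===== PORT B =====
-- `line.find('\\', i, e)` for the single character '\\' with in-range bounds
-- (i ≤ e ≤ len): exact step-for-step port of CPython's bounded find here.
def findBS (cs : List Char) (i e : Nat) : Option Nat :=
  if i < e then
    if cs.getD i ' ' = '\\' then some i else findBS cs (i + 1) e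
  else none
termination_by e - i
decreasing_by
  exact Nat.sub_lt_sub_left ‹i < e› (Nat.lt_succ_self i)

theorem findBS_le_of_some {cs : List Char} {i e j : Nat}
    (h : findBS cs i e = some j) : i ≤ j ∧ j < e := by
  fun_induction findBS cs i e with
  | case1 i hlt hbs => simp_all
  | case2 i hlt hbs ih => have := ih h; omega
  | case3 i hlt => simp_all

-- the while loop of _decoded_len; on the `raise ValueError` branch the port
-- returns the data accumulated before the bad escape (excluded by Pre_do_problem).
def bLoop (cs : List Char) (i : Nat) (data : Int) : Int :=
  if i + 1 < cs.length then
    match hf : findBS cs i (cs.length - 1) with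
    | none => data + ((cs.length - 1 - i : Nat) : Int)
    | some j =>
      let e := cs.getD (j + 1) ' '
      if e = '\\' ∨ e = '"' then bLoop cs (j + 2) (data + ((j - i : Nat) : Int) + 1)
      else if e = 'x' then bLoop cs (j + 4) (data + ((j - i : Nat) : Int) + 1)
      else data + ((j - i : Nat) : Int)
  else data
termination_by cs.length - i
decreasing_by
  · exact Nat.sub_lt_sub_left (Nat.lt_of_succ_lt ‹i + 1 < cs.length›)
      (Nat.lt_succ_of_le (Nat.le_succ_of_le (findBS_le_of_some hf).1))
  · exact Nat.sub_lt_sub_left (Nat.lt_of_succ_lt ‹i + 1 < cs.length›)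
      (Nat.lt_succ_of_le (Nat.le_succ_of_le (Nat.le_succ_of_le (Nat.le_succ_of_le (findBS_le_of_some hf).1))))

def do_problem_alt (lines : List String) : Int :=
  lines.foldl
    (fun acc line =>
      acc + ((line.toList.length : Int) - bLoop line.toList 1 0))
    0

-- ===== PRECONDITION & SPEC =====
-- Pre_ excludes exactly the lines containing a backslash escape other than
-- \\, \" or \xNN in the scanned region, on which A raises AssertionError
-- (and B raises ValueError).
def validTokens : List Char → Bool
  | [] => true
  | [_] => true
  | c :: d :: rest =>
    if c ≠ '\\' then validTokens (d :: rest)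
    else if d = '\\' ∨ d = '"' then validTokens rest
    else if d = 'x' then
      match rest with          -- skip the two hex digits (rest.drop 2)
      | _ :: _ :: rest' => validTokens rest'
      | _ => true
    else false

def Pre_do_problem (lines : List String) : Prop :=
  lines.all (fun l => validTokens (l.toList.drop 1)) = true

instance (lines : List String) : Decidable (Pre_do_problem lines) := by
  unfold Pre_do_problem; infer_instance

def pvWitness_do_problem : List String := ["\"a\\\\b\""]

def Spec_do_problem (lines : List String) (out : Int) : Prop := out = do_problem_alt lines
instance (lines : List String) (out : Int) : Decidable (Spec_do_problem lines out) := by unfold Spec_do_problem; infer_instance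

-- ===== CLAIM (what is proved, stated in full; the proofs are below) =====
def Claim_equal_do_problem : Prop := ∀ (lines : List String), Dom_do_problem lines → Pre_do_problem lines → Spec_do_problem lines (do_problem lines)

-- ===== LEMMAS AND PROOFS =====

theorem findBS_none_spec {cs : List Char} {i e : Nat}
    (h : findBS cs i e = none) : ∀ k, i ≤ k → k < e → cs.getD k ' ' ≠ '\\' := by
  fun_induction findBS cs i e with
  | case1 i hlt hbs => simp_all
  | case2 i hlt hbs ih =>
    intro k hk1 hk2
    rcases Nat.eq_or_lt_of_le hk1 with rfl | hlt'
    · simpa using hbs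
    · exact ih h k hlt' hk2
  | case3 i hlt => omega

theorem findBS_some_spec {cs : List Char} {i e j : Nat}
    (h : findBS cs i e = some j) :
    cs.getD j ' ' = '\\' ∧ ∀ k, i ≤ k → k < j → cs.getD k ' ' ≠ '\\' := by
  fun_induction findBS cs i e with
  | case1 i hlt hbs =>
    simp only [Option.some.injEq] at h
    subst h
    exact ⟨hbs, fun k hk1 hk2 => by omega⟩
  | case2 i hlt hbs ih =>
    obtain ⟨h1, h2⟩ := ih h
    have hij := findBS_le_of_some h
    refine ⟨h1, fun k hk1 hk2 => ?_⟩
    rcases Nat.eq_or_lt_of_le hk1 with rfl | hlt'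
    · exact hbs
    · exact h2 k hlt' hk2
  | case3 i hlt => simp_all

-- A counts a run of k ordinary characters one at a time
theorem aLoop_run (cs : List Char) : ∀ (k i : Nat) (d : Int),
    i + k + 1 ≤ cs.length →
    (∀ t, i ≤ t → t < i + k → cs.getD t ' ' ≠ '\\') →
    aLoop cs i d = aLoop cs (i + k) (d + (k : Int)) := by
  intro k
  induction k with
  | zero => intro i d _ _; simp
  | succ k ih =>
    intro i d hb hno
    have hc : i + 1 < cs.length := by omega
    rw [aLoop, if_pos hc, if_pos (hno i le_rfl (by omega))]
    have := ih (i + 1) (d + 1) (by omega) (fun t ht1 ht2 => hno t (by omega) (by omega))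
    rw [this]
    congr 1 <;> omega

-- the core equivalence of the two loops, as an invariant on the accumulators
theorem aLoop_eq_bLoop_aux (cs : List Char) :
    ∀ (m i : Nat) (d d' : Int), cs.length - i ≤ m →
      aLoop cs i d - d = bLoop cs i d' - d' := by
  intro m
  induction m with
  | zero =>
    intro i d d' hm
    have hc : ¬ (i + 1 < cs.length) := by omega
    rw [aLoop, if_neg hc, bLoop, if_neg hc]
    omega
  | succ m ih =>
    intro i d d' hm
    by_cases hc : i + 1 < cs.length
    · rcases hf : findBS cs i (cs.length - 1) with _ | j
      · -- no backslash before the closing quote: one bulk run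
        have hno := findBS_none_spec hf
        have hrun := aLoop_run cs (cs.length - 1 - i) i d (by omega)
          (fun t ht1 ht2 => hno t ht1 (by omega))
        rw [hrun]
        have : i + (cs.length - 1 - i) = cs.length - 1 := by omega
        rw [this, aLoop, if_neg (by omega)]
        rw [bLoop, if_pos hc, hf]
        dsimp only
        omega
      · obtain ⟨hij, hje⟩ := findBS_le_of_some hf
        obtain ⟨hbs, hno⟩ := findBS_some_spec hf
        have hrun := aLoop_run cs (j - i) i d (by omega)
          (fun t ht1 ht2 => hno t ht1 (by omega))
        have hii : i + (j - i) = j := by omega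
        rw [hrun, hii]
        rw [aLoop, if_pos (by omega), if_neg (not_not_intro hbs)]
        rw [bLoop, if_pos hc, hf]
        simp only
        split_ifs with h1 h2
        · have := ih (j + 2) (d + (↑(j - i) : Int) + 1) (d' + (↑(j - i) : Int) + 1) (by omega)
          omega
        · have := ih (j + 4) (d + (↑(j - i) : Int) + 1) (d' + (↑(j - i) : Int) + 1) (by omega)
          omega
        · omega
    · rw [aLoop, if_neg hc, bLoop, if_neg hc]; omega

theorem fold_eq (lines : List String) : ∀ (c d acc : Int), c - d = acc →
    ((lines.foldl
        (fun (st : Int × Int) line =>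
          (st.1 + (line.toList.length : Int), aLoop line.toList 1 st.2)) (c, d)).1 -
      (lines.foldl
        (fun (st : Int × Int) line =>
          (st.1 + (line.toList.length : Int), aLoop line.toList 1 st.2)) (c, d)).2) =
    lines.foldl
      (fun acc line => acc + ((line.toList.length : Int) - bLoop line.toList 1 0)) acc := by
  induction lines with
  | nil => intro c d acc h; simpa using h
  | cons l ls ih =>
    intro c d acc h
    simp only [List.foldl_cons]
    apply ih
    have h1 : aLoop l.toList 1 d - d = bLoop l.toList 1 0 - 0 :=
      aLoop_eq_bLoop_aux l.toList (l.toList.length) 1 d 0 (by omega)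
    omega

theorem do_problem_spec : Claim_equal_do_problem := by
  intro lines _ _
  unfold Spec_do_problem do_problem do_problem_alt
  exact fold_eq lines 0 0 0 rfl
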